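-- pv_equiv track=rewrite | github.com/gulang2019/SLOServe | SLOsServe/profiler/export_batches.py | _bucket_length
-- ===== SOURCE A (Python) =====
-- def _bucket_length(value: int, mode: str, bucket_size: int) -> int:
--     if value <= 1:
--         # Keep 0/1 untouched so decode token=1 remains distinguishable.
--         return value
--     if mode == "exact":
--         return value
--     if mode == "multiple":
--         if bucket_size <= 1:
--             return value
--         return ((value + bucket_size - 1) // bucket_size) * bucket_size
--     # mode == "pow2"
--     bucket = 1
--     while bucket < value:
--         bucket <<= 1
--     return bucket
-- ===== SOURCE B (Python) =====
-- def _bucket_length(value: int, mode: str, bucket_size: int) -> int: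
--     # small values and "exact" share one early return
--     if value <= 1 or mode == "exact":
--         return value
--     if mode == "multiple":
--         # clamp the bucket to >= 1; ceil-division via negated floor division
--         b = max(bucket_size, 1)
--         return -(-value // b) * b
--     # mode == "pow2": smallest power of two >= value, closed form
--     return 1 << (value - 1).bit_length()
-- ===== Notes on version B (the rewrite author's own statement) =====
-- stated objective: idiomatic
-- what changed: B merges the value<=1 and 'exact' guards into one early return, replaces the bucket_size<=1 branch by clamping with max and the (v+b-1)//b ceiling by the negated-floor-division idiom -(-v//b), and replaces the pow2 doubling loop with the O(1) closed form 1 << (value-1).bit_length().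
import Mathlib
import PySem

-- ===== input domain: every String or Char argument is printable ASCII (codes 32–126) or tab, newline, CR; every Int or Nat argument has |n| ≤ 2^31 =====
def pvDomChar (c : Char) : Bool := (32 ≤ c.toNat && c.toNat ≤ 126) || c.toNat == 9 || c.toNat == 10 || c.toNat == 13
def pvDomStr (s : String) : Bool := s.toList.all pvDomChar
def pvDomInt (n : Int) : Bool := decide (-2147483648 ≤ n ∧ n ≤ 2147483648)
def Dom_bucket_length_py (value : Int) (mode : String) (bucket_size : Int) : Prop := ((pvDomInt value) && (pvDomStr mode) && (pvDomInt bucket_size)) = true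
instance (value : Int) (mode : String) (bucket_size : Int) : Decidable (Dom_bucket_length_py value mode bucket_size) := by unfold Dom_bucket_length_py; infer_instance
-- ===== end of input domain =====

-- B merges the value<=1/'exact' guards, clamps the bucket with max and uses the
-- -(-v//b) ceiling idiom for the 'multiple' branch, and replaces the pow2
-- doubling loop with the closed form 1 << (value-1).bit_length().

-- ===== PORT A =====
-- the 'while bucket < value: bucket <<= 1' loop; the '0 < bucket' conjunct is only a
-- termination guard (on A's actual call bucket starts at 1 and stays positive)
def pvPow2Loop (value bucket : Int) : Int :=
  if _h : 0 < bucket ∧ bucket < value then pvPow2Loop value (bucket <<< (1 : Nat)) else bucket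
termination_by (value - bucket).toNat
decreasing_by
  simp only [Int.shiftLeft_eq]
  omega

def bucket_length_py (value : Int) (mode : String) (bucket_size : Int) : Int :=
  if value ≤ 1 then value
  else if mode = "exact" then value
  else if mode = "multiple" then
    if bucket_size ≤ 1 then value
    else (PySem.Int.floordiv (value + bucket_size - 1) bucket_size) * bucket_size
  else pvPow2Loop value 1

-- ===== PORT B =====
def bucket_length_py_alt (value : Int) (mode : String) (bucket_size : Int) : Int :=
  if value ≤ 1 ∨ mode = "exact" then value
  else if mode = "multiple" then
    let b := max bucket_size 1
    (-(PySem.Int.floordiv (-value) b)) * b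
  else (1 : Int) <<< (PySem.Int.bitLength (value - 1))

-- ===== PRECONDITION & SPEC =====
def Spec_bucket_length_py (value : Int) (mode : String) (bucket_size : Int) (out : Int) : Prop := out = bucket_length_py_alt value mode bucket_size
instance (value : Int) (mode : String) (bucket_size : Int) (out : Int) : Decidable (Spec_bucket_length_py value mode bucket_size out) := by unfold Spec_bucket_length_py; infer_instance

-- ===== CLAIM (what is proved, stated in full; the proofs are below) =====
def Claim_equal_bucket_length_py : Prop := ∀ (value : Int) (mode : String) (bucket_size : Int), Dom_bucket_length_py value mode bucket_size → Spec_bucket_length_py value mode bucket_size (bucket_length_py value mode bucket_size)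

-- ===== LEMMAS AND PROOFS =====

-- both ceiling formulas give the same quotient for a positive divisor
theorem pvCeil_eq (v b : Int) (hb : 0 < b) :
    -(PySem.Int.floordiv (-v) b) = PySem.Int.floordiv (v + b - 1) b := by
  rw [PySem.Int.neg_floordiv_neg_eq_iff_of_pos hb]
  obtain ⟨h1, h2⟩ := (PySem.Int.floordiv_eq_iff_of_pos (a := v + b - 1) hb).mp rfl
  constructor <;> nlinarith

-- running the loop from 2^k returns 2^L, provided 2^L bounds value from above
-- and every strictly smaller admissible power of two is below value
theorem pvPow2Loop_pow (value : Int) : ∀ (k L : Nat), k ≤ L → value ≤ 2 ^ L →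
    (∀ j, k ≤ j → j < L → (2 : Int) ^ j < value) →
    pvPow2Loop value ((2 : Int) ^ k) = 2 ^ L := by
  intro k L hkL hL hbelow
  induction' hn : L - k with n ih generalizing k
  · have hkL' : k = L := by omega
    subst hkL'
    rw [pvPow2Loop, dif_neg]
    rintro ⟨_, h2⟩
    exact absurd h2 (not_lt.mpr hL)
  · have hklt : k < L := by omega
    have hlt : (2 : Int) ^ k < value := hbelow k le_rfl hklt
    rw [pvPow2Loop]
    rw [dif_pos ⟨by positivity, hlt⟩]
    have hshift : ((2 : Int) ^ k) <<< (1 : Nat) = 2 ^ (k + 1) := by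
      simp [Int.shiftLeft_eq, pow_succ]
    rw [hshift]
    exact ih (k + 1) (by omega) (fun j hj hjL => hbelow j (by omega) hjL) (by omega)

theorem pvPow2_branch (value : Int) (hv : 1 < value) :
    pvPow2Loop value 1 = (1 : Int) <<< (PySem.Int.bitLength (value - 1)) := by
  set L : Nat := PySem.Int.bitLength (value - 1) with hL
  have hne : value - 1 ≠ 0 := by omega
  have hupper : value ≤ 2 ^ L := by
    have h := PySem.Int.lt_two_pow_bitLength (value - 1)
    have h2 : ((value - 1).natAbs : Int) < (2 : Int) ^ L := by exact_mod_cast h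
    have h3 : ((value - 1).natAbs : Int) = value - 1 := by omega
    rw [h3] at h2
    linarith [Int.lt_iff_add_one_le.mp h2]
  have hbelow : ∀ j, 0 ≤ j → j < L → (2 : Int) ^ j < value := by
    intro j _ hjL
    have h := PySem.Int.two_pow_bitLength_le (value - 1) hne
    have h1 : (2 : ℕ) ^ j ≤ 2 ^ (L - 1) := Nat.pow_le_pow_right (by norm_num) (by omega)
    have h2 : (2 : ℕ) ^ (L - 1) ≤ (value - 1).natAbs := h
    have habs : ((value - 1).natAbs : Int) = value - 1 := by omega
    have : ((2 : ℕ) ^ j : Int) ≤ value - 1 := by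
      rw [← habs]; exact_mod_cast le_trans h1 h2
    push_cast at this ⊢
    omega
  have := pvPow2Loop_pow value 0 L (Nat.zero_le _) hupper (fun j hj hjL => hbelow j (Nat.zero_le _) hjL)
  rw [pow_zero] at this
  rw [this, Int.shiftLeft_eq, one_mul]

-- ===== VERDICT (by name: the statement is the Claim_ definition above) =====
theorem bucket_length_py_spec : Claim_equal_bucket_length_py := by
  intro value mode bucket_size _
  unfold Spec_bucket_length_py bucket_length_py bucket_length_py_alt
  split_ifs with h1 h2 h3 h4 h5 h6 h7 h8 h9 <;> try (first | rfl | tauto)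
  · -- A: multiple, bucket_size ≤ 1; B: multiple with clamped b = 1
    show value = -PySem.Int.floordiv (-value) (max bucket_size 1) * max bucket_size 1
    have hb : max bucket_size 1 = 1 := by omega
    rw [hb, mul_one]
    exact ((PySem.Int.neg_floordiv_neg_eq_iff_of_pos one_pos).mpr ⟨by omega, by omega⟩).symm
  · -- A: multiple, bucket_size > 1
    show PySem.Int.floordiv (value + bucket_size - 1) bucket_size * bucket_size =
      -PySem.Int.floordiv (-value) (max bucket_size 1) * max bucket_size 1
    have hb : max bucket_size 1 = bucket_size := by omega
    rw [hb, pvCeil_eq value bucket_size (by omega)]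
  · -- pow2 branch
    exact pvPow2_branch value (by omega)
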